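-- pv_equiv track=rewrite | github.com/jguecaimburu/euler | ex47e.py | find_n_consecutive_nums_in_list
-- ===== SOURCE A (Python) =====
-- def find_n_consecutive_nums_in_list(n, list_of_int):
--     answer = []
--     for index, num in enumerate(list_of_int[:-n]):
--         for i in range(n):
--             if list_of_int[index + i] != (num + i):
--                 break
--         else:
--             for i in range(n):
--                 answer.append(list_of_int[index+i])
--     return answer
-- ===== SOURCE B (Python) =====
-- def find_n_consecutive_nums_in_list(n, list_of_int):
--     # One backward pass precomputes run[s] = length of the maximal consecutive
--     # streak starting at s; each start is then checked in O(1).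
--     if n <= 0:
--         return []
--     length = len(list_of_int)
--     run = [1] * length
--     for i in range(length - 2, -1, -1):
--         if list_of_int[i + 1] == list_of_int[i] + 1:
--             run[i] = run[i + 1] + 1
--     answer = []
--     for s in range(length):
--         if run[s] >= n:
--             answer += list_of_int[s:s + n]
--     return answer
-- ===== Notes on version B (the rewrite author's own statement) =====
-- stated objective: faster
-- what changed: B precomputes, in one backward pass, the length of the maximal consecutive streak starting at each position and then decides each window start in O(1), instead of A's rescanning of an n-element window at every start; B also collects the run starting at the last valid index, which A's enumerate(list_of_int[:-n]) off-by-one skips.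
-- intended difference: When 1 <= n <= len and the last n elements form a consecutive run, A returns the collected runs without that final window (its enumerate over list_of_int[:-n] drops the last valid start), while B also appends those n elements, which is the intended value (every run of n consecutive integers). — e.g. on find_n_consecutive_nums_in_list(2, [1, 2, 5, 6]): A returns [1, 2], B returns [1, 2, 5, 6]
import Mathlib
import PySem

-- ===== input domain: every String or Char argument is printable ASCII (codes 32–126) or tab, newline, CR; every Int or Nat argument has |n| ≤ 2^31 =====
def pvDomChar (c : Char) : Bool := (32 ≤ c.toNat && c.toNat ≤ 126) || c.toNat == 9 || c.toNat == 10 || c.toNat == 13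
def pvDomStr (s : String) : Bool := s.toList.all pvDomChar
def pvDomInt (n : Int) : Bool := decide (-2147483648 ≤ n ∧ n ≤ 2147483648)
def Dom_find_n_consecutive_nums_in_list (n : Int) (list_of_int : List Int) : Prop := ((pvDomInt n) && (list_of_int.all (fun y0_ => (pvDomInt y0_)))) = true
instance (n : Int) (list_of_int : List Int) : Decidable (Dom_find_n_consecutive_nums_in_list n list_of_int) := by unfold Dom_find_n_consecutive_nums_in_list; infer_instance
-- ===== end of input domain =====

-- B replaces A's O(len*n) window re-scan by a single backward pass of streak
-- lengths (O(len + output)), and fixes A's off-by-one that skips the run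
-- starting at the last valid index (see D_ below).

-- ===== PORT A =====
-- for-else over range(n): 'else' runs iff no break, i.e. iff the check holds
-- for all i — ported as List.all over the same range. list_of_int[index+i] is
-- always in range here (index < len - n), so pyGetD's default is never used.
def find_n_consecutive_nums_in_list (n : Int) (list_of_int : List Int) : List Int :=
  (PySem.List.enumerate (PySem.List.slice list_of_int none (some (-n))) 0).foldl
    (fun answer p =>
      if (PySem.List.pyRange 0 n 1).all
          (fun i => PySem.List.pyGetD list_of_int (p.1 + i) 0 == p.2 + i)
      then answer ++ (PySem.List.pyRange 0 n 1).map
          (fun i => PySem.List.pyGetD list_of_int (p.1 + i) 0)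
      else answer)
    []

-- ===== PORT B =====
-- Source B builds run[] back to front (run[i] = run[i+1]+1 if a[i+1]=a[i]+1 else 1);
-- the same values by the obvious structural recursion on the list.
def pvRun : List Int → List Int
  | [] => []
  | x :: rest =>
      match rest with
      | [] => [1]
      | y :: _ =>
          let r := pvRun rest
          (if y = x + 1 then r.headD 1 + 1 else 1) :: r

def find_n_consecutive_nums_in_list_alt (n : Int) (list_of_int : List Int) : List Int :=
  if n ≤ 0 then []
  else
    let run := pvRun list_of_int
    (PySem.List.pyRange 0 list_of_int.length 1).foldl
      (fun answer s =>
        if n ≤ PySem.List.pyGetD run s 1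
        then answer ++ PySem.List.slice list_of_int (some s) (some (s + n))
        else answer)
      []

-- ===== PRECONDITION & SPEC =====
-- When 1 ≤ n ≤ len and the last n elements form a consecutive run, A misses it
-- (it enumerates list_of_int[:-n], dropping the last valid start) and returns
-- the collected runs WITHOUT that final one; B also returns those n elements,
-- which is the intended value (every run of n consecutive integers).
def D_find_n_consecutive_nums_in_list (n : Int) (list_of_int : List Int) : Prop :=
  1 ≤ n ∧ n ≤ (list_of_int.length : Int) ∧
    ∀ i < list_of_int.length, list_of_int.length - n.toNat ≤ i → i + 1 < list_of_int.length →
      list_of_int.getD (i + 1) 0 = list_of_int.getD i 0 + 1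
instance (n : Int) (list_of_int : List Int) : Decidable (D_find_n_consecutive_nums_in_list n list_of_int) := by
  unfold D_find_n_consecutive_nums_in_list; infer_instance

def Spec_find_n_consecutive_nums_in_list (n : Int) (list_of_int : List Int) (out : List Int) : Prop :=
  ¬ D_find_n_consecutive_nums_in_list n list_of_int → out = find_n_consecutive_nums_in_list_alt n list_of_int
instance (n : Int) (list_of_int : List Int) (out : List Int) : Decidable (Spec_find_n_consecutive_nums_in_list n list_of_int out) := by
  unfold Spec_find_n_consecutive_nums_in_list; infer_instance

def pvDiffWitness_find_n_consecutive_nums_in_list : Int × List Int := (2, [1, 2, 5, 6])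
def pvDiffWitnessOut_find_n_consecutive_nums_in_list : (List Int) × (List Int) := ([1, 2], [1, 2, 5, 6])

-- ===== CLAIM (what is proved, stated in full; the proofs are below) =====
def Claim_unchanged_find_n_consecutive_nums_in_list : Prop := ∀ (n : Int) (list_of_int : List Int), Dom_find_n_consecutive_nums_in_list n list_of_int → Spec_find_n_consecutive_nums_in_list n list_of_int (find_n_consecutive_nums_in_list n list_of_int)
def Claim_changed_find_n_consecutive_nums_in_list : Prop := Dom_find_n_consecutive_nums_in_list (pvDiffWitness_find_n_consecutive_nums_in_list.1) (pvDiffWitness_find_n_consecutive_nums_in_list.2) ∧ D_find_n_consecutive_nums_in_list (pvDiffWitness_find_n_consecutive_nums_in_list.1) (pvDiffWitness_find_n_consecutive_nums_in_list.2) ∧ find_n_consecutive_nums_in_list (pvDiffWitness_find_n_consecutive_nums_in_list.1) (pvDiffWitness_find_n_consecutive_nums_in_list.2) = pvDiffWitnessOut_find_n_consecutive_nums_in_list.1 ∧ find_n_consecutive_nums_in_list_alt (pvDiffWitness_find_n_consecutive_nums_in_list.1) (pvDiffWitness_find_n_consecutive_nums_in_list.2) = pvDiffWitnessOut_find_n_consecutive_nums_in_list.2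 ∧ pvDiffWitnessOut_find_n_consecutive_nums_in_list.1 ≠ pvDiffWitnessOut_find_n_consecutive_nums_in_list.2
def Claim_exact_find_n_consecutive_nums_in_list : Prop := ∀ (n : Int) (list_of_int : List Int), Dom_find_n_consecutive_nums_in_list n list_of_int → D_find_n_consecutive_nums_in_list n list_of_int → find_n_consecutive_nums_in_list n list_of_int ≠ find_n_consecutive_nums_in_list_alt n list_of_int


-- ===== LEMMAS AND PROOFS =====

-- length of the maximal consecutive streak starting at the head
def streakLen : List Int → Nat
  | [] => 0
  | [_] => 1
  | x :: y :: t => if y = x + 1 then streakLen (y :: t) + 1 else 1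

def pvF (n' : Nat) (a : List Int) (s : Nat) : List Int :=
  if n' ≤ streakLen (a.drop s) then (a.drop s).take n' else []

lemma streakLen_le (l : List Int) : streakLen l ≤ l.length := by
  induction l with
  | nil => simp [streakLen]
  | cons x t ih =>
    cases t with
    | nil => simp [streakLen]
    | cons y t' =>
      by_cases h : y = x + 1
      · simp only [streakLen, if_pos h, List.length_cons]
        simp only [List.length_cons] at ih
        omega
      · simp only [streakLen, if_neg h, List.length_cons]
        omega

lemma getD_drop (a : List Int) (s i : Nat) : (a.drop s).getD i 0 = a.getD (s + i) 0 := by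
  simp [List.getD_eq_getElem?_getD, List.getElem?_drop]

lemma getD_take (a : List Int) (m k : Nat) (hk : k < m) : (a.take m).getD k 0 = a.getD k 0 := by
  simp [List.getD_eq_getElem?_getD, hk]

lemma pvRun_cons_cons (x y : Int) (t : List Int) :
    pvRun (x :: y :: t)
      = (if y = x + 1 then (pvRun (y :: t)).headD 1 + 1 else 1) :: pvRun (y :: t) := by
  cases t <;> rfl

lemma pvRun_headD (l : List Int) (h : l ≠ []) : (pvRun l).headD 1 = (streakLen l : Int) := by
  induction l with
  | nil => simp at h
  | cons x t ih =>
    cases t with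
    | nil => simp [pvRun, streakLen]
    | cons y t' =>
      rw [pvRun_cons_cons, List.headD_cons, ih (by simp)]
      by_cases hxy : y = x + 1
      · simp [streakLen, hxy]
      · simp [streakLen, hxy]

lemma pvRun_getD : ∀ (a : List Int) (s : Nat), s < a.length →
    (pvRun a).getD s 1 = (streakLen (a.drop s) : Int) := by
  intro a
  induction a with
  | nil => intro s hs; simp at hs
  | cons x t ih =>
    intro s hs
    cases s with
    | zero =>
      cases t with
      | nil => simp [pvRun, streakLen]
      | cons y t' =>
        rw [pvRun_cons_cons, List.getD_cons_zero, List.drop_zero,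
          pvRun_headD (y :: t') (by simp)]
        by_cases hxy : y = x + 1
        · simp [streakLen, hxy]
        · simp [streakLen, hxy]
    | succ s' =>
      cases t with
      | nil => simp at hs
      | cons y t' =>
        rw [pvRun_cons_cons, List.getD_cons_succ, List.drop_succ_cons]
        exact ih s' (by simp at hs ⊢; omega)

lemma streak_ge_iff : ∀ (l : List Int) (k : Nat), 1 ≤ k →
    ((k ≤ streakLen l) ↔ (k ≤ l.length ∧ ∀ i, i + 1 < k → l.getD (i+1) 0 = l.getD i 0 + 1)) := by
  intro l
  induction l with
  | nil =>
    intro k hk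
    simp only [streakLen, List.length_nil]
    constructor
    · intro h; omega
    · rintro ⟨h1, -⟩; omega
  | cons x t ih =>
    intro k hk
    cases t with
    | nil =>
      simp only [streakLen, List.length_cons, List.length_nil]
      constructor
      · intro h
        exact ⟨by omega, by intro i hi; omega⟩
      · rintro ⟨h1, -⟩; omega
    | cons y t' =>
      by_cases hxy : y = x + 1
      · simp only [streakLen, if_pos hxy]
        rcases Nat.lt_or_ge k 2 with h1 | h2
        · have hk1 : k = 1 := by omega
          subst hk1
          constructor
          · intro _
            exact ⟨by simp, by intro i hi; omega⟩
          · intro _; omega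
        · have ihk := ih (k-1) (by omega)
          constructor
          · intro h
            have hle : k - 1 ≤ streakLen (y :: t') := by omega
            obtain ⟨hl, hc⟩ := ihk.mp hle
            refine ⟨by simp only [List.length_cons] at hl ⊢; omega, ?_⟩
            intro i hi
            cases i with
            | zero => simp [hxy]
            | succ j =>
              have := hc j (by omega)
              simpa [List.getD_cons_succ] using this
          · rintro ⟨hl, hc⟩
            have hc' : ∀ i, i + 1 < k - 1 → (y :: t').getD (i+1) 0 = (y :: t').getD i 0 + 1 := by
              intro i hi
              have := hc (i+1) (by omega)
              simpa [List.getD_cons_succ] using this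
            have hlen : k - 1 ≤ (y :: t').length := by
              simp only [List.length_cons] at hl ⊢; omega
            have := ihk.mpr ⟨hlen, hc'⟩
            omega
      · simp only [streakLen, if_neg hxy]
        constructor
        · intro h
          have hk1 : k = 1 := by omega
          subst hk1
          exact ⟨by simp, by intro i hi; omega⟩
        · rintro ⟨hl, hc⟩
          by_contra hlt
          have h2 : 2 ≤ k := by omega
          have := hc 0 (by omega)
          simp only [List.getD_cons_succ, List.getD_cons_zero] at this
          exact hxy this

lemma cond_iff (a : List Int) (k n' : Nat) (hn' : 1 ≤ n') (hk : k + n' ≤ a.length) :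
    (∀ i < n', a.getD (k + i) 0 = a.getD k 0 + (i : Int)) ↔ n' ≤ streakLen (a.drop k) := by
  rw [streak_ge_iff _ _ hn']
  have hlen : n' ≤ (a.drop k).length := by simp only [List.length_drop]; omega
  simp only [getD_drop]
  constructor
  · intro h
    refine ⟨hlen, fun i hi => ?_⟩
    have h1 := h i (by omega)
    have h2 := h (i+1) hi
    rw [h2, h1]
    push_cast
    ring
  · rintro ⟨-, h⟩
    intro i
    induction i with
    | zero => intro _; simp
    | succ j ihj =>
      intro hij
      have hc := h j hij
      have hj := ihj (by omega)
      rw [hc, hj]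
      push_cast
      ring

lemma enum_eq_map (xs : List Int) (s : Int) :
    PySem.List.enumerate xs s
      = (List.range xs.length).map (fun (k : Nat) => (s + (k : Int), xs.getD k 0)) := by
  induction xs generalizing s with
  | nil => simp [PySem.List.enumerate_nil]
  | cons x t ih =>
    rw [PySem.List.enumerate_cons, ih (s+1), List.length_cons, List.range_succ_eq_map,
      List.map_cons, List.map_map]
    congr 1
    · simp
    · refine List.map_congr_left (fun k hk => ?_)
      simp only [Function.comp_apply, Nat.succ_eq_add_one, List.getD_cons_succ,
        Prod.mk.injEq]
      exact ⟨by push_cast; ring, trivial⟩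

lemma foldl_if_to_flatMap_bool {α : Type} (l : List α) (c : α → Bool) (f : α → List Int)
    (acc : List Int) :
    l.foldl (fun ans x => if c x then ans ++ f x else ans) acc
      = acc ++ l.flatMap (fun x => if c x then f x else []) := by
  have hbody : (fun (ans : List Int) (x : α) => if c x then ans ++ f x else ans)
      = (fun ans x => ans ++ if c x then f x else []) := by
    funext ans x
    by_cases h : c x <;> simp [h]
  rw [hbody, PySem.List.foldl_append_eq_flatMap]

lemma foldl_if_to_flatMap_prop {α : Type} (l : List α) (p : α → Prop) [DecidablePred p]
    (f : α → List Int) (acc : List Int) :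
    l.foldl (fun ans x => if p x then ans ++ f x else ans) acc
      = acc ++ l.flatMap (fun x => if p x then f x else []) := by
  have hbody : (fun (ans : List Int) (x : α) => if p x then ans ++ f x else ans)
      = (fun ans x => ans ++ if p x then f x else []) := by
    funext ans x
    by_cases h : p x <;> simp [h]
  rw [hbody, PySem.List.foldl_append_eq_flatMap]

lemma flatMap_congr_range {β : Type} (m : Nat) (f g : Nat → List β)
    (h : ∀ k < m, f k = g k) : (List.range m).flatMap f = (List.range m).flatMap g := by
  induction m with
  | zero => simp
  | succ mm ih =>
    rw [List.range_succ, List.flatMap_append, List.flatMap_append,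
      ih (fun k hk => h k (by omega))]
    simp [h mm (by omega)]

lemma win_eq (a : List Int) (s n' : Nat) (h : s + n' ≤ a.length) :
    (List.range n').map (fun i => a.getD (s + i) 0) = (a.drop s).take n' := by
  apply List.ext_getElem
  · simp only [List.length_map, List.length_range, List.length_take, List.length_drop]
    omega
  · intro i h1 h2
    simp only [List.length_map, List.length_range] at h1
    have hsi : s + i < a.length := by omega
    simp [List.getElem_take, List.getElem_drop, List.getD_eq_getElem?_getD,
      List.getElem?_eq_getElem hsi]

lemma A_char (n : Int) (a : List Int) (hn : 1 ≤ n) :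
    find_n_consecutive_nums_in_list n a
      = (List.range (a.length - n.toNat)).flatMap (pvF n.toNat a) := by
  have hneg : (-n) = -((n.toNat : Int)) := by omega
  unfold find_n_consecutive_nums_in_list
  rw [hneg, PySem.List.slice_to_neg_natCast a n.toNat (by omega), enum_eq_map,
    List.length_take]
  have hmin : min (a.length - n.toNat) a.length = a.length - n.toNat := by omega
  rw [hmin, foldl_if_to_flatMap_bool, List.flatMap_map]
  simp only [List.nil_append]
  apply flatMap_congr_range
  intro k hk
  have hcast : n = ((n.toNat : Int)) := by omega
  have hk' : k + n.toNat ≤ a.length := by omega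
  rw [getD_take _ _ _ hk, hcast, PySem.List.pyRange_zero_natCast]
  simp only [List.all_map, List.map_map, Function.comp_def, zero_add, ← Nat.cast_add,
    PySem.List.pyGetD_natCast, Int.toNat_natCast]
  rw [win_eq a k n.toNat hk']
  have hiff : ((List.range n.toNat).all
      (fun i => a.getD (k + i) 0 == a.getD k 0 + (i : Int)) = true)
      ↔ n.toNat ≤ streakLen (a.drop k) := by
    rw [List.all_eq_true]
    simp only [List.mem_range, beq_iff_eq]
    exact cond_iff a k n.toNat (by omega) hk'
  unfold pvF
  by_cases hc : n.toNat ≤ streakLen (a.drop k)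
  · rw [if_pos (hiff.mpr hc), if_pos hc]
  · rw [if_neg (fun h => hc (hiff.mp h)), if_neg hc]

lemma B_char (n : Int) (a : List Int) (hn : 1 ≤ n) :
    find_n_consecutive_nums_in_list_alt n a
      = (List.range a.length).flatMap (pvF n.toNat a) := by
  unfold find_n_consecutive_nums_in_list_alt
  rw [if_neg (by omega)]
  simp only []
  rw [PySem.List.pyRange_zero_natCast, foldl_if_to_flatMap_prop, List.flatMap_map]
  simp only [List.nil_append]
  apply flatMap_congr_range
  intro s hs
  rw [PySem.List.pyGetD_natCast, pvRun_getD a s hs]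
  have hcast : n = ((n.toNat : Int)) := by omega
  rw [hcast, PySem.List.slice_natCast_add]
  simp only [Int.toNat_natCast]
  unfold pvF
  by_cases hc : n.toNat ≤ streakLen (a.drop s)
  · rw [if_pos (by exact_mod_cast hc), if_pos hc]
  · rw [if_neg (by exact_mod_cast hc), if_neg hc]

lemma D_iff (n : Int) (a : List Int) (hn : 1 ≤ n) (hnl : n ≤ (a.length : Int)) :
    D_find_n_consecutive_nums_in_list n a
      ↔ n.toNat ≤ streakLen (a.drop (a.length - n.toNat)) := by
  unfold D_find_n_consecutive_nums_in_list
  rw [streak_ge_iff _ _ (by omega : 1 ≤ n.toNat)]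
  have hlen : n.toNat ≤ (a.drop (a.length - n.toNat)).length := by
    simp only [List.length_drop]; omega
  have hL : n.toNat ≤ a.length := by omega
  simp only [getD_drop]
  constructor
  · rintro ⟨-, -, h⟩
    refine ⟨hlen, fun j hj => ?_⟩
    have hidx : a.length - n.toNat + (j + 1) = (a.length - n.toNat + j) + 1 := by omega
    rw [hidx]
    exact h (a.length - n.toNat + j) (by omega) (by omega) (by omega)
  · rintro ⟨-, h⟩
    refine ⟨hn, hnl, fun i hi hlo hhi => ?_⟩
    have hj : i = a.length - n.toNat + (i - (a.length - n.toNat)) := by omega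
    have := h (i - (a.length - n.toNat)) (by omega)
    have hidx : a.length - n.toNat + (i - (a.length - n.toNat) + 1) = i + 1 := by omega
    have hidx2 : a.length - n.toNat + (i - (a.length - n.toNat)) = i := by omega
    rw [hidx, hidx2] at this
    exact this

lemma tail_split (n : Int) (a : List Int) (hn : 1 ≤ n) (hnl : n ≤ (a.length : Int)) :
    (List.range a.length).flatMap (pvF n.toNat a)
      = (List.range (a.length - n.toNat)).flatMap (pvF n.toNat a)
        ++ pvF n.toNat a (a.length - n.toNat) := by
  have hL : a.length = (a.length - n.toNat) + n.toNat := by omega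
  conv_lhs => rw [hL, List.range_add, List.flatMap_append]
  congr 1
  rw [List.flatMap_map]
  obtain ⟨m, hm⟩ : ∃ m, n.toNat = m + 1 := ⟨n.toNat - 1, by omega⟩
  rw [hm, List.range_succ_eq_map, List.flatMap_cons]
  have htail : (List.map Nat.succ (List.range m)).flatMap
      (fun x => pvF (m+1) a (a.length - (m+1) + x)) = [] := by
    rw [List.flatMap_eq_nil_iff]
    intro x hx
    simp only [List.mem_map, List.mem_range] at hx
    obtain ⟨j, hj, rfl⟩ := hx
    unfold pvF
    rw [if_neg]
    have hle := streakLen_le (a.drop (a.length - (m+1) + Nat.succ j))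
    simp only [List.length_drop] at hle
    omega
  rw [htail]
  simp

lemma nontrivial_case (n : Int) (a : List Int) (hn : 1 ≤ n) (hgt : (a.length : Int) < n) :
    find_n_consecutive_nums_in_list n a = find_n_consecutive_nums_in_list_alt n a := by
  rw [A_char n a hn, B_char n a hn]
  have hz : a.length - n.toNat = 0 := by omega
  rw [hz]
  simp only [List.range_zero, List.flatMap_nil]
  symm
  rw [List.flatMap_eq_nil_iff]
  intro s hs
  simp only [List.mem_range] at hs
  unfold pvF
  rw [if_neg]
  have hle := streakLen_le (a.drop s)
  simp only [List.length_drop] at hle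
  omega

lemma nonpos_case (n : Int) (a : List Int) (hn : n ≤ 0) :
    find_n_consecutive_nums_in_list n a = find_n_consecutive_nums_in_list_alt n a := by
  unfold find_n_consecutive_nums_in_list find_n_consecutive_nums_in_list_alt
  rw [if_pos hn, PySem.List.pyRange_one_eq_nil hn]
  simp only [List.all_nil, List.map_nil, if_true, List.append_nil]
  generalize PySem.List.enumerate (PySem.List.slice a none (some (-n))) 0 = l
  induction l with
  | nil => simp
  | cons p t ih => simp [ih]

lemma main_eq (n : Int) (a : List Int)
    (hnd : ¬ D_find_n_consecutive_nums_in_list n a) :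
    find_n_consecutive_nums_in_list n a = find_n_consecutive_nums_in_list_alt n a := by
  by_cases hn : n ≤ 0
  · exact nonpos_case n a hn
  · have hn1 : 1 ≤ n := by omega
    by_cases hnl : n ≤ (a.length : Int)
    · rw [A_char n a hn1, B_char n a hn1, tail_split n a hn1 hnl]
      have hF : pvF n.toNat a (a.length - n.toNat) = [] := by
        unfold pvF
        rw [if_neg]
        intro hc
        exact hnd ((D_iff n a hn1 hnl).mpr hc)
      rw [hF, List.append_nil]
    · exact nontrivial_case n a hn1 (by omega)

-- ===== VERDICT (by name: the statement is the Claim_ definition above) =====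
theorem find_n_consecutive_nums_in_list_spec : Claim_unchanged_find_n_consecutive_nums_in_list := by
  intro n a _ hnd
  exact main_eq n a hnd

theorem find_n_consecutive_nums_in_list_changed : Claim_changed_find_n_consecutive_nums_in_list := by
  unfold Claim_changed_find_n_consecutive_nums_in_list; decide

theorem find_n_consecutive_nums_in_list_tight : Claim_exact_find_n_consecutive_nums_in_list := by
  unfold Claim_exact_find_n_consecutive_nums_in_list
  intro n a _ hd heq
  obtain ⟨hn, hnl, -⟩ := id hd
  have hc := (D_iff n a hn hnl).mp hd
  rw [A_char n a hn, B_char n a hn, tail_split n a hn hnl] at heq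
  have hF : pvF n.toNat a (a.length - n.toNat) = (a.drop (a.length - n.toNat)).take n.toNat := by
    unfold pvF; rw [if_pos hc]
  rw [hF] at heq
  have hlen := congrArg List.length heq
  simp only [List.length_append, List.length_take, List.length_drop] at hlen
  omega
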